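-- pv_equiv track=rewrite | github.com/open-dicom/dicom_parser | src/dicom_parser/utils/bids/header_queries.py | find_task_name
-- ===== SOURCE A (Python) =====
-- INVALID_CHARACTERS: str = "!@#$%^&*()_-+="
--
-- def strip_element(element: str) -> str:
--     """
--     strips element from BIDS-invalid characters.
--
--     Parameters
--     ----------
--     element : str
--         String element intended for a BIDS specification
--
--     Returns
--     -------
--     str
--         The element stripped from invalid characters
--     """
--     for character in INVALID_CHARACTERS:
--         element = element.replace(character, "")
--     return element
--
-- def find_task_name(header: dict) -> str:
--     """
--     Finds correct value for the "task" field of BIDS specification for fMRI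
--     sequences.
--
--     Parameters
--     ----------
--     header : dict
--         Dictionary containing DICOM's header.
--
--     Returns
--     -------
--     str
--         The task's name.
--     """
--     description = header.get("SeriesDescription", "").lower()
--     if "rsf" in description:
--         task = "rest"
--     else:
--         task = "".join(
--             [strip_element(i).capitalize() for i in description.split("_")]
--         )
--     return task
-- ===== SOURCE B (Python) =====
-- INVALID_CHARACTERS: str = "!@#$%^&*()_-+="
--
--
-- def find_task_name(header: dict) -> str:
--     description = header.get("SeriesDescription", "").lower()
--     if "rsf" in description:
--         return "rest"
--     # Single pass over the lowered description: '_' starts a new word, other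
--     # invalid characters are skipped, and the first kept character of each word
--     # is uppercased (the rest is already lowercase).
--     out = []
--     cap = True
--     for c in description:
--         if c == "_":
--             cap = True
--         elif c not in INVALID_CHARACTERS:
--             out.append(c.upper() if cap else c)
--             cap = False
--     return "".join(out)
-- ===== Notes on version B (the rewrite author's own statement) =====
-- stated objective: idiomatic
-- what changed: A's four-stage pipeline (split on '_', strip each piece with 14 repeated .replace scans, capitalize each piece, join) is replaced by one single pass over the description with a 'capitalize next kept char' flag; valid because the description is already lowercased, so capitalize only uppercases the first kept character of each '_'-separated word.
import Mathlib
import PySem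

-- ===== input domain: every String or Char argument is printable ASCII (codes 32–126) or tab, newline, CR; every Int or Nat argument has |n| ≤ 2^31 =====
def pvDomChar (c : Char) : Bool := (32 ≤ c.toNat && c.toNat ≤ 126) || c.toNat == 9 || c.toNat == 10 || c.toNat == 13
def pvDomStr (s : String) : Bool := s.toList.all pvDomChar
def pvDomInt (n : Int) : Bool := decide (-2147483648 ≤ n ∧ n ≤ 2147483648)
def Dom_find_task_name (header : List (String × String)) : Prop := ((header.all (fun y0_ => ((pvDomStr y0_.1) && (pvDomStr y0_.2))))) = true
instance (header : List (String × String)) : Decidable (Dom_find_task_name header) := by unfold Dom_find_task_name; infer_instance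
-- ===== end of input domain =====

-- B replaces A's split / per-segment strip (14 repeated .replace scans) / capitalize /
-- join pipeline with ONE pass over the description, uppercasing the first kept
-- character after each '_' (idiomatic single-traversal rewrite; same return value).

-- ===== PORT A =====
def pvInvalidCharacters : String := "!@#$%^&*()_-+="

def strip_element (element : String) : String :=
  pvInvalidCharacters.toList.foldl
    (fun e character => PySem.Str.replace e (String.ofList [character]) "") element

-- Python str.capitalize — first char uppercased, rest lowered (exact on ASCII)
def pyCapitalize (s : String) : String :=
  match s.toList with
  | [] => ""
  | c :: rest => String.ofList (PySem.Chars.upperChar c :: PySem.Chars.lower rest)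

def find_task_name (header : List (String × String)) : String :=
  let description := PySem.Str.lower (PySem.Dict.getD (PySem.Dict.mk header) "SeriesDescription" "")
  if PySem.Str.isIn "rsf" description then
    "rest"
  else
    PySem.Str.join ""
      (((PySem.Str.split? description "_").getD []).map (fun i => pyCapitalize (strip_element i)))

-- ===== PORT B =====
def find_task_name_alt (header : List (String × String)) : String :=
  let description := PySem.Str.lower (PySem.Dict.getD (PySem.Dict.mk header) "SeriesDescription" "")
  if PySem.Str.isIn "rsf" description then
    "rest"
  else
    -- the Python for-loop over description with state (out, cap)
    let st := description.toList.foldl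
      (fun (st : List Char × Bool) c =>
        if c = '_' then (st.1, true)
        else if pvInvalidCharacters.toList.contains c then st
        else (st.1 ++ [if st.2 then PySem.Chars.upperChar c else c], false))
      ([], true)
    String.ofList st.1

-- ===== PRECONDITION & SPEC =====
def Spec_find_task_name (header : List (String × String)) (out : String) : Prop := out = find_task_name_alt header
instance (header : List (String × String)) (out : String) : Decidable (Spec_find_task_name header out) := by unfold Spec_find_task_name; infer_instance

-- ===== CLAIM =====
def Claim_equal_find_task_name : Prop := ∀ (header : List (String × String)), Dom_find_task_name header → Spec_find_task_name header (find_task_name header)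

-- ===== LEMMAS AND PROOFS =====

theorem lowerChar_idem (c : Char) : PySem.Chars.lowerChar (PySem.Chars.lowerChar c) = PySem.Chars.lowerChar c := by
  unfold PySem.Chars.lowerChar PySem.Chars.isupper
  split_ifs with h1 h2
  · exfalso
    simp only [Bool.and_eq_true, decide_eq_true_eq, Char.le_def, UInt32.le_iff_toNat_le, Char.toNat] at h1 h2
    have h65 : ('A' : Char).val.toNat = 65 := by decide
    have h90 : ('Z' : Char).val.toNat = 90 := by decide
    have hv : (Char.ofNat (c.toNat + 32)).toNat = c.toNat + 32 := by
      unfold Char.ofNat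
      split_ifs with hvv
      · exact Char.toNat_ofNatAux hvv
      · exact absurd (Or.inl (by have := h1.2; simp only [Char.toNat]; omega)) hvv
    simp only [Char.toNat] at hv
    rw [h65, h90] at h1 h2
    omega
  · rfl
  · rfl

-- replace.go with a one-character pattern and empty replacement is a filter
theorem replace_go_filter (c : Char) :
    ∀ (fuel : Nat) (l acc : List Char), l.length ≤ fuel →
      PySem.Chars.replace.go [c] [] fuel l acc = acc.reverse ++ l.filter (fun x => x ≠ c) := by
  intro fuel
  induction fuel with
  | zero =>
    intro l acc h
    have : l = [] := List.length_eq_zero_iff.mp (Nat.le_zero.mp h)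
    subst this
    simp [PySem.Chars.replace.go]
  | succ n ih =>
    intro l acc h
    cases l with
    | nil => simp [PySem.Chars.replace.go]
    | cons c' t =>
      rw [PySem.Chars.replace.go]
      by_cases hc : c = c'
      · subst hc
        have hp : [c].isPrefixOf (c :: t) = true := by simp [List.isPrefixOf]
        simp only [hp, if_true, List.length_cons, List.length_nil, Nat.zero_add, List.drop_one,
          List.tail_cons, List.reverse_nil, List.nil_append]
        rw [ih t acc (by simpa using h)]
        simp
      · have hp : [c].isPrefixOf (c' :: t) = false := by
          simp [List.isPrefixOf, hc]
        simp only [hp, Bool.false_eq_true, if_false]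
        rw [ih t (c' :: acc) (by simpa using h)]
        simp [Ne.symm hc]

theorem replace_single_filter (l : List Char) (c : Char) :
    PySem.Chars.replace l [c] [] = l.filter (fun x => x ≠ c) := by
  rw [PySem.Chars.replace]
  simp only [List.isEmpty_cons, Bool.false_eq_true, if_false]
  exact replace_go_filter c l.length l [] le_rfl

-- the repeated-replace loop of A's strip_element is one filter
theorem foldl_replace_filter :
    ∀ (cs : List Char) (e : String),
      (cs.foldl (fun e c => PySem.Str.replace e (String.ofList [c]) "") e).toList
        = e.toList.filter (fun x => !cs.contains x) := by
  intro cs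
  induction cs with
  | nil => intro e; simp
  | cons c rest ih =>
    intro e
    rw [List.foldl_cons, ih]
    rw [PySem.Str.toList_replace]
    have h0 : ("" : String).toList = [] := rfl
    simp only [String.toList_ofList, h0]
    rw [replace_single_filter, List.filter_filter]
    apply List.filter_congr
    intro x _
    simp only [List.contains_cons]
    cases hq : (x == c) <;> simp_all

-- A-side helpers on lists: split on '_' as a direct recursion (first segment, rest)
def splitRec : List Char → List Char × List (List Char)
  | [] => ([], [])
  | c :: t =>
    if c = '_' then ([], (splitRec t).1 :: (splitRec t).2)
    else (c :: (splitRec t).1, (splitRec t).2)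

theorem splitOn_go_char :
    ∀ (fuel : Nat) (l cur : List Char) (acc : List (List Char)), l.length < fuel →
      PySem.Chars.splitOn.go ['_'] fuel l cur acc
        = acc.reverse ++ (cur.reverse ++ (splitRec l).1) :: (splitRec l).2 := by
  intro fuel
  induction fuel with
  | zero => intro l cur acc h; omega
  | succ n ih =>
    intro l cur acc h
    cases l with
    | nil => simp [PySem.Chars.splitOn.go, splitRec]
    | cons c t =>
      rw [PySem.Chars.splitOn.go]
      by_cases hc : c = '_'
      · subst hc
        have hp : ['_'].isPrefixOf ('_' :: t) = true := by simp [List.isPrefixOf]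
        simp only [hp, if_true, List.length_cons, List.length_nil, Nat.zero_add, List.drop_one,
          List.tail_cons]
        rw [ih t [] (cur.reverse :: acc) (by simpa using h)]
        simp [splitRec]
      · have hp : ['_'].isPrefixOf (c :: t) = false := by
          simp only [List.isPrefixOf, Bool.and_eq_false_iff, beq_eq_false_iff_ne, ne_eq]
          exact Or.inl (fun hq => hc hq.symm)
        simp only [hp, Bool.false_eq_true, if_false]
        rw [ih t (c :: cur) acc (by simpa using h)]
        simp [splitRec, hc]

theorem splitOn_eq_splitRec (l : List Char) :
    PySem.Chars.splitOn l ['_'] = (splitRec l).1 :: (splitRec l).2 := by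
  rw [PySem.Chars.splitOn, splitOn_go_char (l.length + 1) l [] [] (by omega)]
  simp

-- A-side per-segment pipeline on lists: capitalize after filtering
def capList : List Char → List Char
  | [] => []
  | c :: rest => PySem.Chars.upperChar c :: PySem.Chars.lower rest

def validChar (c : Char) : Bool := !pvInvalidCharacters.toList.contains c

-- B-side loop as a direct recursion
def go2 : List Char → Bool → List Char
  | [], _ => []
  | c :: t, cap =>
    if c = '_' then go2 t true
    else if pvInvalidCharacters.toList.contains c then go2 t cap
    else (if cap then PySem.Chars.upperChar c else c) :: go2 t false

theorem foldl_step_fst (l : List Char) :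
    ∀ (acc : List Char) (cap : Bool),
      (l.foldl
        (fun (st : List Char × Bool) c =>
          if c = '_' then (st.1, true)
          else if pvInvalidCharacters.toList.contains c then st
          else (st.1 ++ [if st.2 then PySem.Chars.upperChar c else c], false))
        (acc, cap)).1 = acc ++ go2 l cap := by
  induction l with
  | nil => intro acc cap; simp [go2]
  | cons c t ih =>
    intro acc cap
    rw [List.foldl_cons]
    by_cases hc : c = '_'
    · subst hc; simp only [if_true, go2]; rw [ih acc true]
    · by_cases hv : pvInvalidCharacters.toList.contains c
      · simp only [hc, if_false, hv, if_true, go2]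
        rw [ih acc cap]
      · simp only [hc, if_false, hv, Bool.false_eq_true, go2]
        rw [ih (acc ++ [if cap then PySem.Chars.upperChar c else c]) false]
        simp

-- the heart: A's split/strip/capitalize pipeline equals B's one-pass loop,
-- on an already-lowercased list
theorem split_pipeline_eq_go2 (l : List Char) (h : ∀ c ∈ l, PySem.Chars.lowerChar c = c) :
    capList ((splitRec l).1.filter validChar)
        ++ ((splitRec l).2.map (fun s => capList (s.filter validChar))).flatten = go2 l true
    ∧ (splitRec l).1.filter validChar
        ++ ((splitRec l).2.map (fun s => capList (s.filter validChar))).flatten = go2 l false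
    ∧ (∀ x ∈ (splitRec l).1, x ∈ l) := by
  induction l with
  | nil => simp [splitRec, capList, go2]
  | cons c t ih =>
    have ht : ∀ x ∈ t, PySem.Chars.lowerChar x = x := fun x hx => h x (List.mem_cons_of_mem _ hx)
    obtain ⟨ih1, ih2, ih3⟩ := ih ht
    by_cases hc : c = '_'
    · subst hc
      refine ⟨?_, ?_, by simp [splitRec]⟩ <;>
      · simp only [splitRec, if_true, List.map_cons, List.flatten_cons, go2, List.filter_nil,
          capList, List.nil_append]
        exact ih1
    · by_cases hv : pvInvalidCharacters.toList.contains c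
      · have hvc : validChar c = false := by simp only [validChar, hv, Bool.not_true]
        refine ⟨?_, ?_, ?_⟩
        · simp only [splitRec, hc, if_false, List.filter_cons, hvc, Bool.false_eq_true, if_false,
            go2, hv, if_true]
          exact ih1
        · simp only [splitRec, hc, if_false, List.filter_cons, hvc, Bool.false_eq_true, if_false,
            go2, hv, if_true]
          exact ih2
        · intro x hx
          simp only [splitRec, hc, if_false] at hx
          rcases List.mem_cons.mp hx with rfl | hx
          · exact List.mem_cons_self
          · exact List.mem_cons_of_mem _ (ih3 x hx)
      · have hvf : pvInvalidCharacters.toList.contains c = false := eq_false_of_ne_true hv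
        have hvc : validChar c = true := by simp only [validChar, hvf, Bool.not_false]
        have hlow : PySem.Chars.lower ((splitRec t).1.filter validChar)
            = (splitRec t).1.filter validChar := by
          rw [PySem.Chars.lower]
          conv_rhs => rw [← List.map_id ((splitRec t).1.filter validChar)]
          apply List.map_congr_left
          intro x hx
          exact ht x (ih3 x (List.mem_of_mem_filter hx))
        refine ⟨?_, ?_, ?_⟩
        · simp only [splitRec, hc, if_false, List.filter_cons, hvc, if_true,
            go2, hvf, Bool.false_eq_true]
          have hcap : capList (c :: List.filter validChar (splitRec t).1)
              = PySem.Chars.upperChar c :: PySem.Chars.lower (List.filter validChar (splitRec t).1) := rfl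
          rw [hcap, hlow, List.cons_append, ih2]
        · simp only [splitRec, hc, if_false, List.filter_cons, hvc, if_true,
            go2, hvf, Bool.false_eq_true]
          rw [List.cons_append, ih2]
        · intro x hx
          simp only [splitRec, hc, if_false] at hx
          rcases List.mem_cons.mp hx with rfl | hx
          · exact List.mem_cons_self
          · exact List.mem_cons_of_mem _ (ih3 x hx)

theorem join_nil_flatten (xs : List (List Char)) : PySem.Chars.join [] xs = xs.flatten := by
  rw [PySem.Chars.join]
  induction xs with
  | nil => rfl
  | cons a t ih =>
    cases t with
    | nil => simp [List.intercalate]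
    | cons b t' =>
      rw [List.intercalate] at *
      simp only [List.intersperse_cons₂, List.flatten_cons] at *
      simp [ih]

theorem pyCapitalize_toList (s : String) : (pyCapitalize s).toList = capList s.toList := by
  unfold pyCapitalize capList
  cases hs : s.toList with
  | nil => rfl
  | cons c rest => simp

theorem strip_element_toList (i : String) :
    (strip_element i).toList = i.toList.filter validChar := by
  unfold strip_element
  rw [foldl_replace_filter]
  rfl

-- ===== VERDICT =====
theorem find_task_name_spec : Claim_equal_find_task_name := by
  intro header _
  unfold Spec_find_task_name find_task_name find_task_name_alt
  set description := PySem.Str.lower (PySem.Dict.getD (PySem.Dict.mk header) "SeriesDescription" "") with hdesc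
  simp only [PySem.Str.isIn_eq]
  by_cases hr : PySem.Chars.isIn "rsf".toList description.toList = true
  · rw [if_pos hr, if_pos hr]
  · rw [if_neg hr, if_neg hr]
    have hlowered : ∀ c ∈ description.toList, PySem.Chars.lowerChar c = c := by
      rw [hdesc, PySem.Str.toList_lower, PySem.Chars.lower]
      intro c hc
      obtain ⟨y, _, rfl⟩ := List.mem_map.mp hc
      exact lowerChar_idem y
    have hsplit := PySem.Str.split?_map description "_"
    have hsep : ("_" : String).toList = ['_'] := rfl
    rw [hsep, PySem.Chars.split?] at hsplit
    simp only [List.isEmpty_cons, Bool.false_eq_true, if_false] at hsplit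
    cases hL : PySem.Str.split? description "_" with
    | none => rw [hL] at hsplit; simp at hsplit
    | some L =>
      rw [hL] at hsplit
      simp only [Option.map_some, Option.some.injEq] at hsplit
      have hmain := split_pipeline_eq_go2 description.toList hlowered
      apply String.ext
      rw [PySem.Str.toList_join]
      have h0 : ("" : String).toList = [] := rfl
      rw [h0, join_nil_flatten, String.toList_ofList]
      rw [foldl_step_fst description.toList [] true, List.nil_append]
      rw [Option.getD_some]
      rw [List.map_map]
      have hmapeq : L.map (String.toList ∘ fun i => pyCapitalize (strip_element i))
          = (L.map String.toList).map (fun s => capList (s.filter validChar)) := by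
        rw [List.map_map]
        apply List.map_congr_left
        intro i _
        simp only [Function.comp_apply]
        rw [pyCapitalize_toList, strip_element_toList]
      rw [hmapeq, hsplit, splitOn_eq_splitRec]
      simp only [List.map_cons, List.flatten_cons]
      exact hmain.1
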